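-- pv_equiv track=rewrite | github.com/fatibr19/Monolith-To-Micro | extrac.py | extract_method_name_simple
-- ===== SOURCE A (Python) =====
-- def extract_method_name_simple(declaration: str) -> str:
--     """
--     Extract method name from its declaration.
--     """
--     words = declaration.split()
--     access_modifiers = {'public', 'protected', 'private', 'static'}
--
--     if not words:
--         return ""
--
--     for i, word in enumerate(words):
--         if '(' in word:
--             return word.split('(')[0]
--
--     return ""
-- ===== SOURCE B (Python) =====
-- def extract_method_name_simple(declaration: str) -> str:
--     idx = declaration.find('(')
--     if idx == -1:
--         return ""
--     start = idx
--     while start > 0 and not declaration[start - 1].isspace():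
--         start -= 1
--     return declaration[start:idx]
-- ===== Notes on version B (the rewrite author's own statement) =====
-- stated objective: simpler
-- what changed: B drops the split-into-word-list and forward scan over words: it finds the first '(' directly and scans backward to the preceding whitespace, returning that slice.
import Mathlib
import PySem

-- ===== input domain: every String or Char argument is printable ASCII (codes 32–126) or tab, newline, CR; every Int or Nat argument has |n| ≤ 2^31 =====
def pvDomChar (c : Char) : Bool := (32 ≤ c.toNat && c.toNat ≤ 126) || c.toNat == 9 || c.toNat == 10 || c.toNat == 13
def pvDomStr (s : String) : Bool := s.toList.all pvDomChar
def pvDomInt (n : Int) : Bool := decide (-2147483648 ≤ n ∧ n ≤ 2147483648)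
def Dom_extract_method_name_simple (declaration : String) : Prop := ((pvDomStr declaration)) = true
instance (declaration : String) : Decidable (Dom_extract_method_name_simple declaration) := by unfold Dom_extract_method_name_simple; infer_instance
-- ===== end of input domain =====

-- B replaces A's split-into-words-and-scan-forward by find('(') plus a backward scan to the
-- preceding whitespace (objective: simpler — no word list is built); same return value everywhere.

-- ===== PORT A =====
-- the for-loop over words: first word containing '(' gives word.split('(')[0]; falling off the loop returns ""
def pvLoopA : List String → String
  | [] => ""
  | w :: ws =>
    if PySem.Str.isIn "(" w then
      -- word.split('(')[0]: sep "(" is nonempty so split? is some, and a split is never empty,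
      -- so neither default is ever used
      ((PySem.Str.split? w "(").getD []).headD ""
    else pvLoopA ws

def extract_method_name_simple (declaration : String) : String :=
  let words := PySem.Str.split₀ declaration
  if words.isEmpty then "" else pvLoopA words

-- ===== PORT B =====
-- while start > 0 and not declaration[start - 1].isspace(): start -= 1
-- (s.getD (start) is declaration[start] ; every access is in range: start < idx < len)
def pvBackscan (s : List Char) : Nat → Nat
  | 0 => 0
  | start + 1 => if PySem.Chars.isspace (s.getD start ' ') then start + 1 else pvBackscan s start

def extract_method_name_simple_alt (declaration : String) : String :=
  let idx := PySem.Chars.find declaration.toList ['(']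
  if idx = -1 then ""
  else
    let start := pvBackscan declaration.toList idx.toNat
    PySem.Str.slice declaration (some (start : Int)) (some idx)

-- ===== PRECONDITION & SPEC =====
def Spec_extract_method_name_simple (declaration : String) (out : String) : Prop := out = extract_method_name_simple_alt declaration
instance (declaration : String) (out : String) : Decidable (Spec_extract_method_name_simple declaration out) := by unfold Spec_extract_method_name_simple; infer_instance

-- ===== CLAIM (what is proved, stated in full; the proofs are below) =====
def Claim_equal_extract_method_name_simple : Prop := ∀ (declaration : String), Dom_extract_method_name_simple declaration → Spec_extract_method_name_simple declaration (extract_method_name_simple declaration)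

-- ===== LEMMAS AND PROOFS =====

-- char-level version of A's loop over words
def pvLoopAC : List (List Char) → List Char
  | [] => []
  | w :: ws => if '(' ∈ w then w.takeWhile (· ≠ '(') else pvLoopAC ws

-- the common reference: single scan keeping the (reversed) current word prefix
def pvBref : List Char → List Char → List Char
  | _, [] => []
  | cur, c :: rest =>
    if c = '(' then cur.reverse
    else if PySem.Chars.isspace c then pvBref [] rest
    else pvBref (c :: cur) rest

theorem pv_takeWhile_append_stop {p : Char → Bool} (xs ys : List Char) (c : Char)
    (hc : p c = false) : (xs ++ c :: ys).takeWhile p = xs.takeWhile p := by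
  induction xs with
  | nil => simp [List.takeWhile, hc]
  | cons a t ih =>
    simp only [List.cons_append, List.takeWhile_cons]
    cases h : p a <;> simp [ih]

theorem pv_takeWhile_append_of_mem (p q : List Char) (h : '(' ∈ p) :
    (p ++ q).takeWhile (· ≠ '(') = p.takeWhile (· ≠ '(') := by
  induction p with
  | nil => simp at h
  | cons a t ih =>
    by_cases ha : a = '('
    · subst ha; simp
    · have h' : '(' ∈ t := by
        rcases List.mem_cons.mp h with h1 | h1
        · exact absurd h1.symm ha
        · exact h1
      have hx := ih h'
      simp only [ne_eq, decide_not] at hx ⊢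
      simp [ha, hx]

theorem pv_find_go_paren (l : List Char) (k : Nat) :
    PySem.Chars.find.go ['('] l k = if '(' ∈ l then ((k + l.idxOf '(' : Nat) : Int) else -1 := by
  induction l generalizing k with
  | nil => simp [PySem.Chars.find.go]
  | cons c t ih =>
    by_cases hc : c = '('
    · subst hc
      simp [PySem.Chars.find.go, List.isPrefixOf, List.idxOf_cons_self]
    · have hpre : (['('] : List Char).isPrefixOf (c :: t) = false := by
        simp [List.isPrefixOf]
        intro h; exact hc h.symm
      rw [PySem.Chars.find.go]
      simp only [hpre]
      rw [ih (k+1)]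
      by_cases hm : '(' ∈ t
      · have : '(' ∈ c :: t := List.mem_cons_of_mem _ hm
        simp [hm, this, List.idxOf_cons_ne _ (fun h => hc h), Nat.succ_eq_add_one]
        ring
      · have : '(' ∉ c :: t := by simp [hm]; exact fun h => hc h.symm
        simp [hm, this]

theorem pv_find_paren (s : List Char) :
    PySem.Chars.find s ['('] = if '(' ∈ s then ((s.idxOf '(' : Nat) : Int) else -1 := by
  rw [PySem.Chars.find, pv_find_go_paren]
  simp


theorem pv_isIn_paren (s : List Char) :
    PySem.Chars.isIn ['('] s = decide ('(' ∈ s) := by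
  rw [PySem.Chars.isIn, pv_find_paren]
  by_cases h : '(' ∈ s <;> simp [h]

theorem pv_split0_acc (s cur : List Char) (acc : List (List Char)) :
    PySem.Chars.split₀.go s cur acc = acc.reverse ++ PySem.Chars.split₀.go s cur [] := by
  induction s generalizing cur acc with
  | nil =>
    by_cases h : cur = []
    · simp [PySem.Chars.split₀.go, h]
    · simp [PySem.Chars.split₀.go, h, List.isEmpty_iff]
  | cons c rest ih =>
    by_cases hs : PySem.Chars.isspace c
    · by_cases h : cur = []
      · subst h
        rw [PySem.Chars.split₀.go]
        conv_rhs => rw [PySem.Chars.split₀.go]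
        simp only [hs, if_true, List.isEmpty_nil]
        exact ih _ _
      · rw [PySem.Chars.split₀.go]
        conv_rhs => rw [PySem.Chars.split₀.go]
        simp only [hs, if_true, List.isEmpty_iff, h, if_false]
        rw [ih _ (cur.reverse :: acc), ih _ [cur.reverse]]
        simp
    · rw [PySem.Chars.split₀.go]
      conv_rhs => rw [PySem.Chars.split₀.go]
      simp only [hs]
      exact ih _ _

theorem pv_splitOn_acc (fuel : Nat) (l cur : List Char) (acc : List (List Char)) :
    PySem.Chars.splitOn.go ['('] fuel l cur acc = acc.reverse ++ PySem.Chars.splitOn.go ['('] fuel l cur [] := by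
  induction fuel generalizing l cur acc with
  | zero => simp [PySem.Chars.splitOn.go]
  | succ fuel ih =>
    cases l with
    | nil => simp [PySem.Chars.splitOn.go]
    | cons c rest =>
      by_cases hp : (['('] : List Char).isPrefixOf (c :: rest)
      · rw [PySem.Chars.splitOn.go]
        conv_rhs => rw [PySem.Chars.splitOn.go]
        simp only [hp, if_true]
        rw [ih _ _ (cur.reverse :: acc), ih _ _ [cur.reverse]]
        simp
      · rw [PySem.Chars.splitOn.go]
        conv_rhs => rw [PySem.Chars.splitOn.go]
        simp only [hp]
        exact ih _ _ _

theorem pv_splitOn_head (fuel : Nat) (l cur : List Char) (h : l.length ≤ fuel) :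
    ∃ r, PySem.Chars.splitOn.go ['('] fuel l cur [] = (cur.reverse ++ l.takeWhile (· ≠ '(')) :: r := by
  induction fuel generalizing l cur with
  | zero =>
    have : l = [] := List.length_eq_zero_iff.mp (Nat.le_zero.mp h)
    subst this
    exact ⟨[], by simp [PySem.Chars.splitOn.go]⟩
  | succ fuel ih =>
    cases l with
    | nil => exact ⟨[], by simp [PySem.Chars.splitOn.go]⟩
    | cons c rest =>
      by_cases hc : c = '('
      · subst hc
        rw [PySem.Chars.splitOn.go]
        have hp : (['('] : List Char).isPrefixOf ('(' :: rest) = true := by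
          simp [List.isPrefixOf]
        simp only [hp, if_true]
        refine ⟨PySem.Chars.splitOn.go ['('] fuel rest [] [], ?_⟩
        rw [pv_splitOn_acc]
        simp
      · rw [PySem.Chars.splitOn.go]
        have hp : (['('] : List Char).isPrefixOf (c :: rest) = false := by
          simp [List.isPrefixOf]; intro h'; exact hc h'.symm
        simp only [hp]
        obtain ⟨r, hr⟩ := ih rest (c :: cur) (by simpa using Nat.le_of_succ_le_succ h)
        refine ⟨r, ?_⟩
        rw [hr]
        simp [hc]

theorem pv_loopA_map (ws : List (List Char)) :
    pvLoopA (List.map String.ofList ws) = String.ofList (pvLoopAC ws) := by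
  induction ws with
  | nil => rfl
  | cons w ws ih =>
    rw [List.map_cons, pvLoopA, pvLoopAC]
    have hIn : PySem.Str.isIn "(" (String.ofList w) = decide ('(' ∈ w) := by
      rw [PySem.Str.isIn]
      simp [pv_isIn_paren]
    by_cases hw : '(' ∈ w
    · simp only [hIn, hw, decide_true, if_true]
      rw [PySem.Str.split?]
      obtain ⟨r, hr⟩ := pv_splitOn_head (w.length + 1) w [] (by omega)
      rw [PySem.Chars.split?]
      simp only [String.toList_ofList]
      rw [PySem.Chars.splitOn]
      have hsep : ("(" : String).toList = ['('] := by decide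
      rw [hsep]
      rw [hr]
      simp
    · simp [PySem.Str.isIn, pv_isIn_paren, hw, ih]

-- once the current word contains '(', A's answer is fixed
theorem pv_found (s cur : List Char) (h : '(' ∈ cur) :
    pvLoopAC (PySem.Chars.split₀.go s cur []) = cur.reverse.takeWhile (· ≠ '(') := by
  induction s generalizing cur with
  | nil =>
    have hne : cur ≠ [] := List.ne_nil_of_mem h
    rw [PySem.Chars.split₀.go]
    simp only [List.isEmpty_iff, hne, if_false]
    have : '(' ∈ cur.reverse := List.mem_reverse.mpr h
    simp [pvLoopAC, this]
  | cons c rest ih =>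
    rw [PySem.Chars.split₀.go]
    by_cases hs : PySem.Chars.isspace c
    · have hne : cur ≠ [] := List.ne_nil_of_mem h
      simp only [hs, if_true, List.isEmpty_iff, hne, if_false]
      rw [pv_split0_acc]
      have : '(' ∈ cur.reverse := List.mem_reverse.mpr h
      simp [pvLoopAC, this]
    · simp only [hs, Bool.false_eq_true, if_false]
      rw [ih (c :: cur) (List.mem_cons_of_mem _ h)]
      have : '(' ∈ cur.reverse := List.mem_reverse.mpr h
      rw [List.reverse_cons, pv_takeWhile_append_of_mem _ _ this]

-- A's char-level computation equals the reference scan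
theorem pv_all_ne_paren (cur : List Char) (h : '(' ∉ cur) :
    cur.takeWhile (· ≠ '(') = cur :=
  List.takeWhile_eq_self_iff.mpr (by
    intro x hx
    simp only [ne_eq, decide_eq_true_eq]
    intro hxe; exact h (hxe ▸ hx))

theorem pv_main_A (s cur : List Char) (h : '(' ∉ cur) :
    pvLoopAC (PySem.Chars.split₀.go s cur []) = pvBref cur s := by
  induction s generalizing cur with
  | nil =>
    rw [PySem.Chars.split₀.go, pvBref]
    by_cases hne : cur = []
    · simp [hne, pvLoopAC]
    · simp only [List.isEmpty_iff, hne, if_false]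
      have : '(' ∉ cur.reverse := fun hc => h (List.mem_reverse.mp hc)
      simp [pvLoopAC, this]
  | cons c rest ih =>
    rw [PySem.Chars.split₀.go, pvBref]
    by_cases hc : c = '('
    · subst hc
      have hs : PySem.Chars.isspace '(' = false := by decide
      simp only [hs, Bool.false_eq_true, if_false, if_true]
      rw [pv_found rest ('(' :: cur) (List.mem_cons_self)]
      rw [List.reverse_cons]
      have hrev : '(' ∉ cur.reverse := fun hc => h (List.mem_reverse.mp hc)
      rw [pv_takeWhile_append_stop cur.reverse [] '(' (by simp)]
      exact pv_all_ne_paren _ hrev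
    · by_cases hs : PySem.Chars.isspace c
      · simp only [hs, if_true, hc, if_false]
        by_cases hne : cur = []
        · simp [hne, ih [] (by simp)]
        · simp only [List.isEmpty_iff, hne, if_false]
          rw [pv_split0_acc]
          have hrev : '(' ∉ cur.reverse := fun hcm => h (List.mem_reverse.mp hcm)
          simp only [List.reverse_cons, List.reverse_nil, List.nil_append,
            List.singleton_append, pvLoopAC, hrev, if_false]
          exact ih [] (by simp)
      · simp only [hs, Bool.false_eq_true, if_false, hc, if_false]
        exact ih (c :: cur) (by
          intro hm
          rcases List.mem_cons.mp hm with h1 | h1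
          · exact hc h1.symm
          · exact h h1)

theorem pv_backscan_le (s : List Char) (i : Nat) : pvBackscan s i ≤ i := by
  induction i with
  | zero => simp [pvBackscan]
  | succ n ih =>
    rw [pvBackscan]
    split
    · exact le_refl _
    · exact Nat.le_succ_of_le ih

theorem pv_backscan_drop (s : List Char) (i : Nat) (h : i ≤ s.length) :
    (s.take i).drop (pvBackscan s i)
      = ((s.take i).reverse.takeWhile (fun c => !PySem.Chars.isspace c)).reverse := by
  induction i with
  | zero => simp [pvBackscan]
  | succ n ih =>
    have hn : n < s.length := h
    have hget : s.getD n ' ' = s[n] := List.getD_eq_getElem s ' ' hn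
    have htake : s.take (n + 1) = s.take n ++ [s[n]] := by
      rw [List.take_add_one]
      simp [List.getElem?_eq_getElem hn]
    rw [pvBackscan, hget, htake]
    by_cases hs : PySem.Chars.isspace s[n]
    · simp only [hs, if_true]
      rw [List.drop_eq_nil_iff.mpr (by simp only [List.length_append, List.length_take, List.length_cons, List.length_nil]; omega)]
      rw [List.reverse_append]
      simp only [List.reverse_cons, List.reverse_nil, List.nil_append, List.singleton_append]
      rw [List.takeWhile_cons]
      simp [hs]
    · simp only [hs, Bool.false_eq_true, if_false]
      have hle : pvBackscan s n ≤ n := pv_backscan_le s n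
      rw [List.drop_append_of_le_length (by simp [List.length_take]; omega)]
      rw [List.reverse_append]
      simp only [List.reverse_cons, List.reverse_nil, List.nil_append, List.singleton_append]
      rw [List.takeWhile_cons]
      simp only [hs, Bool.not_false, if_true]
      rw [List.reverse_cons, ← ih (Nat.le_of_lt hn)]

-- the reference scan equals B's trailing-nonspace-run-before-the-first-paren
theorem pv_main_B (s cur : List Char) (h : ∀ c ∈ cur, PySem.Chars.isspace c = false) :
    pvBref cur s = if '(' ∈ s then
        ((cur.reverse ++ s.take (s.idxOf '(')).reverse.takeWhile (fun c => !PySem.Chars.isspace c)).reverse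
      else [] := by
  induction s generalizing cur with
  | nil => simp [pvBref]
  | cons c rest ih =>
    rw [pvBref]
    by_cases hc : c = '('
    · subst hc
      simp only [List.mem_cons, true_or, if_true, List.idxOf_cons_self, List.take_zero,
        List.append_nil]
      rw [List.takeWhile_eq_self_iff.mpr (by intro x hx; simp [h x (by simpa using hx)])]
      rw [List.reverse_reverse]
    · rw [List.idxOf_cons_ne _ hc]
      by_cases hs : PySem.Chars.isspace c
      · simp only [hc, if_false, hs, if_true]
        rw [ih [] (by simp)]
        by_cases hm : '(' ∈ rest
        · have hm' : '(' ∈ c :: rest := List.mem_cons_of_mem _ hm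
          simp only [hm, if_true, hm', Nat.succ_eq_add_one, List.take_succ_cons,
            List.reverse_nil, List.nil_append]
          have he : (cur.reverse ++ c :: rest.take (rest.idxOf '(')).reverse
              = (rest.take (rest.idxOf '(')).reverse ++ c :: cur := by simp
          rw [he, pv_takeWhile_append_stop _ _ c (by simp [hs])]
        · have hm' : '(' ∉ c :: rest := by
            simp only [List.mem_cons, not_or]
            exact ⟨fun he => hc he.symm, hm⟩
          simp [hm, hm']
      · simp only [hc, if_false, hs, Bool.false_eq_true, if_false]
        rw [ih (c :: cur) (by
          intro x hx
          rcases List.mem_cons.mp hx with h1 | h1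
          · subst h1; simpa using hs
          · exact h x h1)]
        by_cases hm : '(' ∈ rest
        · have hm' : '(' ∈ c :: rest := List.mem_cons_of_mem _ hm
          simp only [hm, if_true, hm', Nat.succ_eq_add_one, List.take_succ_cons]
          have he : (c :: cur).reverse ++ rest.take (rest.idxOf '(')
              = cur.reverse ++ c :: rest.take (rest.idxOf '(') := by simp
          rw [he]
        · have hm' : '(' ∉ c :: rest := by
            simp only [List.mem_cons, not_or]
            exact ⟨fun he => hc he.symm, hm⟩
          simp [hm, hm']

theorem pv_A_eq_bref (declaration : String) :
    extract_method_name_simple declaration = String.ofList (pvBref [] declaration.toList) := by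
  rw [extract_method_name_simple]
  have hmain := pv_main_A declaration.toList [] (by simp)
  rw [show PySem.Chars.split₀.go declaration.toList [] [] = PySem.Chars.split₀ declaration.toList
    from rfl] at hmain
  by_cases he : PySem.Chars.split₀ declaration.toList = []
  · rw [he] at hmain
    have : pvBref [] declaration.toList = [] := by rw [← hmain]; rfl
    rw [this]
    have hempty : (PySem.Str.split₀ declaration).isEmpty = true := by
      rw [PySem.Str.split₀, he]; rfl
    simp only [hempty, if_true]
  · have hne : (PySem.Str.split₀ declaration).isEmpty = false := by
      rw [PySem.Str.split₀]
      simp [he]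
    simp only [hne, Bool.false_eq_true, if_false]
    rw [PySem.Str.split₀, pv_loopA_map, hmain]

theorem pv_B_eq_bref (declaration : String) :
    extract_method_name_simple_alt declaration = String.ofList (pvBref [] declaration.toList) := by
  rw [extract_method_name_simple_alt]
  have hB := pv_main_B declaration.toList [] (by simp)
  simp only [List.reverse_nil, List.nil_append] at hB
  by_cases hm : '(' ∈ declaration.toList
  · have hfind : PySem.Chars.find declaration.toList ['('] =
        ((declaration.toList.idxOf '(' : Nat) : Int) := by
      rw [pv_find_paren]; simp [hm]
    have hlt : declaration.toList.idxOf '(' < declaration.toList.length :=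
      List.idxOf_lt_length_of_mem hm
    simp only [hfind]
    rw [if_neg (by omega)]
    rw [hB, if_pos hm]
    apply String.toList_inj.mp
    simp only [PySem.Str.toList_slice, PySem.Chars.slice_eq_listSlice, Int.toNat_natCast,
      String.toList_ofList]
    rw [PySem.List.slice_natCast]
    rw [← List.drop_take]
    exact pv_backscan_drop declaration.toList _ (Nat.le_of_lt hlt)
  · have hfind : PySem.Chars.find declaration.toList ['('] = -1 := by
      rw [pv_find_paren]; simp [hm]
    simp only [hfind]
    rw [hB, if_neg hm]
    rfl

-- ===== VERDICT (by name: the statement is the Claim_ definition above) =====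
theorem extract_method_name_simple_spec : Claim_equal_extract_method_name_simple := by
  intro declaration _
  unfold Spec_extract_method_name_simple
  rw [pv_A_eq_bref, pv_B_eq_bref]
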